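-- pv_equiv track=rewrite | github.com/beyang/pystig | stig.py | arguniq
-- ===== SOURCE A (Python) =====
-- def arguniq(xs):
--     seen = set()
--     args = []
--     uniqs = []
--     for i, x in enumerate(xs):
--         if x not in seen:
--             seen.add(x)
--             args.append(i)
--             uniqs.append(x)
--     return uniqs, args
-- ===== SOURCE B (Python) =====
-- def arguniq(xs):
--     uniqs = []
--     for x in xs:
--         if x not in uniqs:
--             uniqs.append(x)
--     return uniqs, [xs.index(x) for x in uniqs]
-- ===== Notes on version B (the rewrite author's own statement) =====
-- stated objective: alternative
-- what changed: Drops the seen-set and the index bookkeeping inside the loop: B dedups by membership in the growing output list itself, then recovers each first-occurrence index in a separate pass with xs.index, trading the single-pass lockstep state for two simple passes.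
import Mathlib
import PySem

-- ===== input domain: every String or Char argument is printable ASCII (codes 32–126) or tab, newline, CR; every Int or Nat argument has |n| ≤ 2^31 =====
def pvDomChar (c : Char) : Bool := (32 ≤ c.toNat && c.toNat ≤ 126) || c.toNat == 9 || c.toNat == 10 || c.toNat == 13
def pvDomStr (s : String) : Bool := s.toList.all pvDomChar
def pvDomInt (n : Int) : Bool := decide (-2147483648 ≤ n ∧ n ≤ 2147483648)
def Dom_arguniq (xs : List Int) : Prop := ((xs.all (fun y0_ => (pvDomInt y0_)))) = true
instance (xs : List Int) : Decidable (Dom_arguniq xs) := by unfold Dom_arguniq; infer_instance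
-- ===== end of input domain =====

-- B drops the seen-set and in-loop index bookkeeping: it dedups against the growing output
-- list itself, then recovers each first-occurrence index in a second pass with xs.index.

-- ===== PORT A =====
def arguniq (xs : List Int) : List Int × List Int :=
  let st := (PySem.List.enumerate xs).foldl
    (fun (st : PySem.Set Int × List Int × List Int) p =>
      if PySem.Set.contains st.1 p.2 then st
      else (PySem.Set.add st.1 p.2, st.2.1 ++ [p.1], st.2.2 ++ [p.2]))
    (PySem.Set.empty, [], [])
  (st.2.2, st.2.1)

-- ===== PORT B =====
-- xs.index(x) is ported as (index? xs x).getD 0; it is exact here since every x in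
-- uniqs is drawn from xs, so index? never returns none.
def arguniq_alt (xs : List Int) : List Int × List Int :=
  let uniqs := xs.foldl (fun u x => if x ∈ u then u else u ++ [x]) []
  (uniqs, uniqs.map (fun x => ((PySem.List.index? xs x).getD 0 : Int)))

-- ===== PRECONDITION & SPEC =====
def Spec_arguniq (xs : List Int) (out : List Int × List Int) : Prop := out = arguniq_alt xs
instance (xs : List Int) (out : List Int × List Int) : Decidable (Spec_arguniq xs out) := by unfold Spec_arguniq; infer_instance

-- ===== CLAIM (what is proved, stated in full; the proofs are below) =====
def Claim_equal_arguniq : Prop := ∀ (xs : List Int), Dom_arguniq xs → Spec_arguniq xs (arguniq xs)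

-- ===== LEMMAS AND PROOFS =====

-- first-occurrence index of a fresh element appended after `pre`
theorem index?_prefix_self (pre suf : List Int) (x : Int) (hx : x ∉ pre) :
    PySem.List.index? (pre ++ x :: suf) x = some pre.length := by
  have h1 : PySem.List.index? (pre ++ [x]) x = some pre.length :=
    PySem.List.index?_append_singleton_self pre x hx
  have h2 := PySem.List.index?_append_of_mem (l := pre ++ [x]) (t := suf) (v := x)
    (by simp)
  rw [show pre ++ x :: suf = (pre ++ [x]) ++ suf by simp, h2]
  exact h1

-- loop invariant: A's triple fold over the enumerated suffix equals B's two passes,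
-- where `u` holds exactly the elements of the already-consumed prefix `pre`.
theorem arguniq_loop (full : List Int) (suf : List Int) :
    ∀ (pre u : List Int), full = pre ++ suf → (∀ y, y ∈ u ↔ y ∈ pre) →
    (PySem.List.enumerate suf (pre.length : Int)).foldl
      (fun (st : PySem.Set Int × List Int × List Int) p =>
        if PySem.Set.contains st.1 p.2 then st
        else (PySem.Set.add st.1 p.2, st.2.1 ++ [p.1], st.2.2 ++ [p.2]))
      (u, u.map (fun x => ((PySem.List.index? full x).getD 0 : Int)), u)
    = (suf.foldl (fun u x => if x ∈ u then u else u ++ [x]) u,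
       (suf.foldl (fun u x => if x ∈ u then u else u ++ [x]) u).map
         (fun x => ((PySem.List.index? full x).getD 0 : Int)),
       suf.foldl (fun u x => if x ∈ u then u else u ++ [x]) u) := by
  induction suf with
  | nil => intro pre u _ _; simp [PySem.List.enumerate_nil]
  | cons x suf ih =>
    intro pre u hfull hu
    rw [PySem.List.enumerate_cons, List.foldl_cons, List.foldl_cons]
    by_cases hmem : x ∈ u
    · have hc : PySem.Set.contains u x = true := by
        simp [PySem.Set.contains, hmem]
      rw [if_pos hc, if_pos hmem]
      have hlen : ((pre ++ [x]).length : Int) = (pre.length : Int) + 1 := by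
        simp
      have hinv : ∀ y, y ∈ u ↔ y ∈ pre ++ [x] := by
        intro y
        constructor
        · intro h; exact List.mem_append_left _ ((hu y).mp h)
        · intro h
          rcases List.mem_append.mp h with h | h
          · exact (hu y).mpr h
          · simp at h; subst h; exact hmem
      have := ih (pre ++ [x]) u (by simpa [List.append_assoc] using hfull) hinv
      rw [← hlen]; exact this
    · have hc : ¬ PySem.Set.contains u x = true := by
        simp [PySem.Set.contains, hmem]
      rw [if_neg hc, if_neg hmem]
      have hxpre : x ∉ pre := fun h => hmem ((hu x).mpr h)
      have hidx : (List.idxOf? x full).getD 0 = pre.length := by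
        rw [hfull, ← PySem.List.index?_eq_idxOf?, index?_prefix_self pre suf x hxpre]; rfl
      have hstate :
          ((PySem.Set.add u x : PySem.Set Int),
            u.map (fun x => ((PySem.List.index? full x).getD 0 : Int)) ++ [(pre.length : Int)],
            u ++ [x])
          = (u ++ [x],
             (u ++ [x]).map (fun x => ((PySem.List.index? full x).getD 0 : Int)),
             u ++ [x]) := by
        simp [PySem.Set.add, PySem.Set.contains, hmem, hidx]
      rw [hstate]
      have hlen : ((pre ++ [x]).length : Int) = (pre.length : Int) + 1 := by
        simp
      have := ih (pre ++ [x]) (u ++ [x]) (by simpa [List.append_assoc] using hfull)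
        (by intro y; simp [hu y])
      rw [← hlen]; exact this

-- ===== VERDICT (by name: the statement is the Claim_ definition above) =====
theorem arguniq_spec : Claim_equal_arguniq := by
  intro xs _
  unfold Spec_arguniq arguniq arguniq_alt
  have h := arguniq_loop xs xs [] [] (by simp) (by simp)
  simp only [List.length_nil, Int.natCast_zero, List.map_nil] at h
  have he : (PySem.Set.empty : PySem.Set Int) = ([] : List Int) := rfl
  simp only [he, h]
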